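-- pv_equiv track=rewrite | github.com/ShinWon-Chul/AlgorithmWithPython | programmers/PCCP_모의고사/[PCCP 모의고사 1회] 4번.py | solution
-- ===== SOURCE A (Python) =====
-- import heapq
--
-- def solution(program):
--     answer = []
--     wait_dict = {i: 0 for i in range(1, 11)}
--
--     # 0 점수, 1 호출 시간, 2 실행 시간
--     sorted_program = sorted(program, key=lambda x: x[1])
--
--     time = sorted_program[0][1]
--     min_heap = []
--     index = 0
--     n = len(sorted_program)
--
--     while index < n or min_heap:
--         while index < n and sorted_program[index][1] <= time:
--             heapq.heappush(min_heap, (sorted_program[index][0], sorted_program[index][1], sorted_program[index][2]))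
--             index += 1
--
--         if min_heap:
--             priority, start_time, exec_time = heapq.heappop(min_heap)
--             wait_dict[priority] += time - start_time
--             time += exec_time
--         else:
--             if index < n:
--                 time = sorted_program[index][1]
--
--     answer.append(time)
--     for i in range(1, 11):
--         answer.append(wait_dict[i])
--
--     return answer
-- ===== SOURCE B (Python) =====
-- def solution(program):
--     waits = {i: 0 for i in range(1, 11)}
--     remaining = [(p[0], p[1], p[2]) for p in program]
--     arrived = []
--     time = min(p[1] for p in program)
--     while remaining or arrived:
--         still = []
--         for job in remaining:
--             (arrived if job[1] <= time else still).append(job)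
--         remaining = still
--         if arrived:
--             job = min(arrived)
--             arrived.remove(job)
--             waits[job[0]] += time - job[1]
--             time += job[2]
--         else:
--             time = min(job[1] for job in remaining)
--     return [time] + [waits[i] for i in range(1, 11)]
-- ===== Notes on version B (the rewrite author's own statement) =====
-- stated objective: simpler
-- what changed: B drops the initial sort and the heap entirely: it keeps the jobs in two plain lists (not-yet-called / arrived), moves jobs between them as the clock advances, and picks each next job by a linear scan for the minimal (priority, call_time, exec_time) triple, jumping to the earliest remaining call time when nothing has arrived.
import Mathlib
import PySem

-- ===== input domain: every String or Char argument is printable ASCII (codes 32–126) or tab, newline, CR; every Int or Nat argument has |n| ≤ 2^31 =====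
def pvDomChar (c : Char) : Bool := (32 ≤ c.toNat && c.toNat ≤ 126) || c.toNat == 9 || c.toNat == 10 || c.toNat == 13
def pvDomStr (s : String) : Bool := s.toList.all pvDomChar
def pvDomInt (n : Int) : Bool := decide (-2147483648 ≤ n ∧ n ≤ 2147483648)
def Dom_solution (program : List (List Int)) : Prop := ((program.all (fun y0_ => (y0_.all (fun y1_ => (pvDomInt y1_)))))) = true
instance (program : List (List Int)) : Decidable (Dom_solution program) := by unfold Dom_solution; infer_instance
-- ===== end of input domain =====

-- B removes the sort and the heap: it keeps two plain lists (not-yet-called / arrived jobs)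
-- and picks each next job by a linear scan for the minimal (priority, call, exec) triple;
-- same return value, simpler machinery (no heapq, no sorting).

-- shared small helpers: the (priority, call_time, exec_time) triple a row contributes,
-- Python's tuple '<' on such triples, and Python's min() of a nonempty list (first minimum)
def toTriple (r : List Int) : Int × Int × Int :=
  (PySem.List.pyGetD r 0 0, PySem.List.pyGetD r 1 0, PySem.List.pyGetD r 2 0)

def tLt (a b : Int × Int × Int) : Bool :=
  a.1 < b.1 || (a.1 == b.1 && (a.2.1 < b.2.1 || (a.2.1 == b.2.1 && a.2.2 < b.2.2)))

def pyMinT (m : Int × Int × Int) : List (Int × Int × Int) → Int × Int × Int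
  | [] => m
  | x :: xs => pyMinT (if tLt x m then x else m) xs

def pyMinI (m : Int) : List Int → Int
  | [] => m
  | x :: xs => pyMinI (if x < m then x else m) xs

-- wait_dict = {i: 0 for i in range(1, 11)}  (identical line in both sources)
def initWaits : PySem.Dict Int Int :=
  (PySem.List.pyRange 1 11 1).foldl (fun d i => d.insert i 0) PySem.Dict.empty

-- ===== PORT A =====
-- heapq is modelled value-exactly: heappush appends, heappop returns the least tuple and
-- removes one occurrence of it (ties between equal int-triples are equal values, so which
-- physical element heapq pops is unobservable).
def popMin (l : List (Int × Int × Int)) : Option ((Int × Int × Int) × List (Int × Int × Int)) :=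
  match l with
  | [] => none
  | x :: xs => let m := pyMinT x xs; some (m, l.erase m)

-- the outer 'while index < n or min_heap' loop; fuel only makes it total (2n+1 always suffices:
-- each iteration pops a job or is a jump immediately followed by a pop).
-- wait_dict[priority] += …  is Dict.modify (the key is present under Pre_, where 1 ≤ priority ≤ 10).
def loopA : Nat → List (Int × Int × Int) → List (Int × Int × Int) → Int → PySem.Dict Int Int →
    Int × PySem.Dict Int Int
  | 0, _, _, time, waits => (time, waits)
  | Nat.succ fuel, suffix, heap, time, waits =>
    if suffix.isEmpty && heap.isEmpty then (time, waits)
    else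
      -- inner while: push sorted_program[index] while its call time ≤ time
      let pushed := suffix.takeWhile (fun j => decide (j.2.1 ≤ time))
      let rest := suffix.dropWhile (fun j => decide (j.2.1 ≤ time))
      let heap' := heap ++ pushed
      match popMin heap' with
      | some (m, h2) =>
          loopA fuel rest h2 (time + m.2.2) (waits.modify m.1 0 (· + (time - m.2.1)))
      | none =>
          match rest with
          | [] => (time, waits)           -- unreachable: heap' = [] forces rest = suffix ≠ []
          | j :: _ => loopA fuel rest heap' j.2.1 waits

def solution (program : List (List Int)) : List Int :=
  match PySem.List.sorted program (fun r => PySem.List.pyGetD r 1 0) false with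
  | [] => []                               -- Python: IndexError on sorted_program[0] (outside Pre_)
  | r0 :: _ =>
    let jobs := (PySem.List.sorted program (fun r => PySem.List.pyGetD r 1 0) false).map toTriple
    let res := loopA (2 * jobs.length + 1) jobs [] (PySem.List.pyGetD r0 1 0) initWaits
    res.1 :: (PySem.List.pyRange 1 11 1).map (fun i => res.2.getD i 0)

-- ===== PORT B =====
-- the 'while remaining or arrived' loop of Source B: move every called job to 'arrived',
-- run the minimal arrived triple, else jump to the earliest remaining call time.
def loopB : Nat → List (Int × Int × Int) → List (Int × Int × Int) → Int → PySem.Dict Int Int →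
    Int × PySem.Dict Int Int
  | 0, _, _, time, waits => (time, waits)
  | Nat.succ fuel, remaining, arrived, time, waits =>
    if remaining.isEmpty && arrived.isEmpty then (time, waits)
    else
      let still := remaining.filter (fun j => !decide (j.2.1 ≤ time))
      let arr := arrived ++ remaining.filter (fun j => decide (j.2.1 ≤ time))
      match arr with
      | a :: as_ =>
          let m := pyMinT a as_
          loopB fuel still (arr.erase m) (time + m.2.2) (waits.modify m.1 0 (· + (time - m.2.1)))
      | [] =>
          match still with
          | [] => (time, waits)            -- unreachable while the loop guard holds
          | s :: ss => loopB fuel still arr (pyMinI s.2.1 (ss.map (fun j => j.2.1))) waits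

def solution_alt (program : List (List Int)) : List Int :=
  match program with
  | [] => []                               -- Python: ValueError from min() on empty (outside Pre_)
  | _ :: _ =>
    let jobs := program.map toTriple
    let t0 := match jobs.map (fun j => j.2.1) with
              | [] => 0
              | c :: cs => pyMinI c cs
    let res := loopB (2 * jobs.length + 1) jobs [] t0 initWaits
    res.1 :: (PySem.List.pyRange 1 11 1).map (fun i => res.2.getD i 0)

-- ===== PRECONDITION & SPEC =====
-- Pre_ excludes exactly the crashes of A: the empty list (IndexError on sorted_program[0]),
-- rows shorter than 3 (IndexError on x[1]/x[2]) and priorities outside 1..10 (KeyError on wait_dict).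
def Pre_solution (program : List (List Int)) : Prop :=
  program ≠ [] ∧ ∀ row ∈ program,
    3 ≤ row.length ∧ 1 ≤ PySem.List.pyGetD row 0 0 ∧ PySem.List.pyGetD row 0 0 ≤ 10
instance (program : List (List Int)) : Decidable (Pre_solution program) := by
  unfold Pre_solution; infer_instance

def pvWitness_solution : List (List Int) := [[1, 0, 5], [2, 3, 2]]

def Spec_solution (program : List (List Int)) (out : List Int) : Prop := out = solution_alt program
instance (program : List (List Int)) (out : List Int) : Decidable (Spec_solution program out) := by
  unfold Spec_solution; infer_instance

-- ===== CLAIM (what is proved, stated in full; the proofs are below) =====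
def Claim_equal_solution : Prop :=
  ∀ (program : List (List Int)), Dom_solution program → Pre_solution program →
    Spec_solution program (solution program)

-- ===== LEMMAS AND PROOFS =====

lemma tLt_conn (a b : Int × Int × Int) (h1 : tLt a b = false) (h2 : tLt b a = false) : a = b := by
  rcases a with ⟨a1, a2, a3⟩; rcases b with ⟨b1, b2, b3⟩
  simp [tLt] at h1 h2
  simp only [Prod.mk.injEq]
  refine ⟨?_, ?_, ?_⟩ <;> omega

lemma tLt_trans {a b c : Int × Int × Int} (h1 : tLt a b = true) (h2 : tLt b c = true) : tLt a c = true := by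
  rcases a with ⟨a1, a2, a3⟩; rcases b with ⟨b1, b2, b3⟩; rcases c with ⟨c1, c2, c3⟩
  simp [tLt] at *; omega
lemma tLt_neg_trans {a b c : Int × Int × Int} (h1 : tLt a b = false) (h2 : tLt b c = false) : tLt a c = false := by
  rcases a with ⟨a1, a2, a3⟩; rcases b with ⟨b1, b2, b3⟩; rcases c with ⟨c1, c2, c3⟩
  simp [tLt] at *; omega
lemma tLt_irrefl (a : Int × Int × Int) : tLt a a = false := by
  rcases a with ⟨a1, a2, a3⟩; simp [tLt]

lemma pyMinT_mem (m : Int × Int × Int) (l : List (Int × Int × Int)) : pyMinT m l ∈ m :: l := by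
  induction l generalizing m with
  | nil => simp [pyMinT]
  | cons x xs ih =>
    rw [pyMinT]
    by_cases hxm : tLt x m = true
    · rcases List.mem_cons.mp (ih x) with h | h <;> simp [hxm, h]
    · rcases List.mem_cons.mp (ih m) with h | h <;> simp [hxm, h]

lemma pyMinT_not_lt (m : Int × Int × Int) (l : List (Int × Int × Int)) :
    ∀ y ∈ m :: l, tLt y (pyMinT m l) = false := by
  induction l generalizing m with
  | nil => intro y hy; simp at hy; subst hy; simp [pyMinT, tLt_irrefl]
  | cons x xs ih =>
    intro y hy
    rw [pyMinT]
    have ih' := ih (if tLt x m then x else m)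
    simp only [List.mem_cons] at hy
    rcases hy with h | h | hy
    · -- y = m
      rw [h]
      by_cases hxm : tLt x m = true
      · have hx : tLt x (pyMinT x xs) = false := by
          have := ih' x (by simp [hxm]); simpa [hxm] using this
        simp only [hxm, if_true]
        by_contra hc
        simp only [Bool.not_eq_false] at hc
        exact absurd (tLt_trans hxm hc) (by simp [hx])
      · have := ih' m (by simp [hxm]); simpa [hxm] using this
    · -- y = x
      rw [h]
      by_cases hxm : tLt x m = true
      · have := ih' x (by simp [hxm]); simpa [hxm] using this
      · have hm : tLt m (pyMinT m xs) = false := by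
          have := ih' m (by simp [hxm]); simpa [hxm] using this
        simp only [hxm]
        simp only [Bool.not_eq_true] at hxm
        exact tLt_neg_trans hxm hm
    · exact ih' y (by simp [hy])

lemma pyMinT_eq_of_perm {m1 m2 : Int × Int × Int} {l1 l2 : List (Int × Int × Int)}
    (h : (m1 :: l1).Perm (m2 :: l2)) : pyMinT m1 l1 = pyMinT m2 l2 := by
  have h1 := pyMinT_mem m1 l1
  have h2 := pyMinT_mem m2 l2
  exact tLt_conn _ _
    (pyMinT_not_lt m2 l2 _ (h.mem_iff.mp h1))
    (pyMinT_not_lt m1 l1 _ (h.mem_iff.mpr h2))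


lemma pyMinI_mem (m : Int) (l : List Int) : pyMinI m l ∈ m :: l := by
  induction l generalizing m with
  | nil => simp [pyMinI]
  | cons x xs ih =>
    rw [pyMinI]
    by_cases hxm : x < m
    · rcases List.mem_cons.mp (ih x) with h | h <;> simp [hxm, h]
    · rcases List.mem_cons.mp (ih m) with h | h <;> simp [hxm, h]

lemma pyMinI_le (m : Int) (l : List Int) : ∀ y ∈ m :: l, pyMinI m l ≤ y := by
  induction l generalizing m with
  | nil => intro y hy; simp at hy; subst hy; simp [pyMinI]
  | cons x xs ih =>
    intro y hy
    rw [pyMinI]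
    have ih' := ih (if x < m then x else m)
    simp only [List.mem_cons] at hy
    rcases hy with h | h | hy
    · rw [h]
      by_cases hxm : x < m
      · have := ih' x (by simp [hxm]); simp only [hxm, if_pos] at this ⊢; omega
      · have := ih' m (by simp [hxm]); simpa [hxm] using this
    · rw [h]
      by_cases hxm : x < m
      · have := ih' x (by simp [hxm]); simpa [hxm] using this
      · have := ih' m (by simp [hxm]); simp only [hxm] at this ⊢; simp at this ⊢; omega
    · exact ih' y (by simp [hy])

lemma takeWhile_eq_filter_sorted (t : Int) :
    ∀ (l : List (Int × Int × Int)), l.Pairwise (fun a b => a.2.1 ≤ b.2.1) →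
      l.takeWhile (fun j => decide (j.2.1 ≤ t)) = l.filter (fun j => decide (j.2.1 ≤ t)) := by
  intro l hl
  induction l with
  | nil => rfl
  | cons x xs ih =>
    rcases List.pairwise_cons.mp hl with ⟨hx, hxs⟩
    by_cases hxt : x.2.1 ≤ t
    · simp [List.takeWhile_cons, hxt, ih hxs]
    · simp only [List.takeWhile_cons, List.filter_cons, decide_eq_true_eq, hxt, if_false]
      symm
      simp only [List.filter_eq_nil_iff]
      intro y hy
      have := hx y hy
      simp; omega

lemma dropWhile_eq_filter_sorted (t : Int) :
    ∀ (l : List (Int × Int × Int)), l.Pairwise (fun a b => a.2.1 ≤ b.2.1) →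
      l.dropWhile (fun j => decide (j.2.1 ≤ t)) = l.filter (fun j => !decide (j.2.1 ≤ t)) := by
  intro l hl
  induction l with
  | nil => rfl
  | cons x xs ih =>
    rcases List.pairwise_cons.mp hl with ⟨hx, hxs⟩
    by_cases hxt : x.2.1 ≤ t
    · simp [List.dropWhile_cons, hxt, ih hxs]
    · simp only [List.dropWhile_cons, List.filter_cons]
      rw [if_neg (by simpa using hxt)]
      rw [if_pos (by simpa using hxt)]
      congr 1
      symm
      apply List.filter_eq_self.mpr
      intro y hy
      have := hx y hy
      simp; omega




lemma loopA_eq_loopB : ∀ (fuel : Nat) (suffix heap remaining arrived : List (Int × Int × Int))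
    (time : Int) (waits : PySem.Dict Int Int),
    suffix.Perm remaining → heap.Perm arrived →
    suffix.Pairwise (fun a b => a.2.1 ≤ b.2.1) →
    loopA fuel suffix heap time waits = loopB fuel remaining arrived time waits := by
  intro fuel
  induction fuel with
  | zero => intros; rfl
  | succ fuel ih =>
    intro suffix heap remaining arrived time waits hp1 hp2 hs
    by_cases hemp : suffix = [] ∧ heap = []
    · rcases hemp with ⟨rfl, rfl⟩
      have hr : remaining = [] := hp1.symm.eq_nil
      have ha : arrived = [] := hp2.symm.eq_nil
      subst hr; subst ha
      rfl
    · have hne1 : (suffix.isEmpty && heap.isEmpty) = false := by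
        rcases (not_and_or.mp hemp) with h | h <;> cases suffix <;> cases heap <;> simp_all
      have hne2 : (remaining.isEmpty && arrived.isEmpty) = false := by
        have l1 := hp1.length_eq; have l2 := hp2.length_eq
        cases suffix <;> cases heap <;> cases remaining <;> cases arrived <;> simp_all
      rw [loopA, loopB, if_neg (by simp [hne1]), if_neg (by simp [hne2])]
      simp only [takeWhile_eq_filter_sorted time suffix hs,
        dropWhile_eq_filter_sorted time suffix hs]
      have hheap : (heap ++ suffix.filter (fun j => decide (j.2.1 ≤ time))).Perm
          (arrived ++ remaining.filter (fun j => decide (j.2.1 ≤ time))) :=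
        hp2.append (hp1.filter _)
      have hrestp : (suffix.filter (fun j => !decide (j.2.1 ≤ time))).Perm
          (remaining.filter (fun j => !decide (j.2.1 ≤ time))) := hp1.filter _
      have hsort' : (suffix.filter (fun j => !decide (j.2.1 ≤ time))).Pairwise
          (fun a b => a.2.1 ≤ b.2.1) := hs.filter _
      cases hhc : heap ++ suffix.filter (fun j => decide (j.2.1 ≤ time)) with
      | cons h0 hr' =>
        rw [hhc] at hheap
        cases hac : arrived ++ remaining.filter (fun j => decide (j.2.1 ≤ time)) with
        | nil => rw [hac] at hheap; exact absurd hheap.length_eq (by simp)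
        | cons a0 ar' =>
          rw [hac] at hheap
          have hmeq : pyMinT h0 hr' = pyMinT a0 ar' := pyMinT_eq_of_perm hheap
          simp only [popMin, hmeq]
          exact ih _ _ _ _ _ _ hrestp (hheap.erase _) hsort'
      | nil =>
        rw [hhc] at hheap
        have hac : arrived ++ remaining.filter (fun j => decide (j.2.1 ≤ time)) = [] := by
          have := hheap.length_eq; simpa using List.length_eq_zero_iff.mp this.symm
        rw [hac]
        simp only [popMin]
        cases hrc : suffix.filter (fun j => !decide (j.2.1 ≤ time)) with
        | nil =>
          rw [hrc] at hrestp
          have : remaining.filter (fun j => !decide (j.2.1 ≤ time)) = [] := hrestp.symm.eq_nil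
          rw [this]
        | cons j tl =>
          rw [hrc] at hrestp hsort'
          cases hsc : remaining.filter (fun j => !decide (j.2.1 ≤ time)) with
          | nil => rw [hsc] at hrestp; exact absurd hrestp.length_eq (by simp)
          | cons s ss =>
            rw [hsc] at hrestp
            have hteq : j.2.1 = pyMinI s.2.1 (ss.map (fun j => j.2.1)) := by
              have hmapperm : ((j :: tl).map (fun j => j.2.1)).Perm
                  ((s :: ss).map (fun j => j.2.1)) := hrestp.map _
              have hmem : pyMinI s.2.1 (ss.map (fun j => j.2.1)) ∈
                  (j :: tl).map (fun j => j.2.1) := by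
                have := pyMinI_mem s.2.1 (ss.map (fun j => j.2.1))
                exact hmapperm.mem_iff.mpr (by simpa using this)
              have hle : pyMinI s.2.1 (ss.map (fun j => j.2.1)) ≤ j.2.1 := by
                apply pyMinI_le
                exact hmapperm.mem_iff.mp (by simp)
              have hge : j.2.1 ≤ pyMinI s.2.1 (ss.map (fun j => j.2.1)) := by
                simp only [List.map_cons, List.mem_cons, List.mem_map] at hmem
                rcases hmem with h | ⟨y, hy, h⟩
                · omega
                · have := (List.pairwise_cons.mp hsort').1 y hy; omega
              omega
            show loopA fuel (j :: tl) [] j.2.1 waits =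
              loopB fuel (s :: ss) [] (pyMinI s.2.1 (ss.map (fun j => j.2.1))) waits
            rw [← hteq]
            exact ih _ _ _ _ _ _ hrestp (List.Perm.refl _) hsort'

-- ===== VERDICT (by name: the statement is the Claim_ definition above) =====
theorem solution_spec : Claim_equal_solution := by
  intro program hdom hpre
  rcases hpre with ⟨hne, -⟩
  unfold Spec_solution solution solution_alt
  split
  · rename_i hsp
    exact absurd ((PySem.List.sorted_eq_nil_iff _ _ _).mp hsp) hne
  · rename_i r0 rt hsp
    match program, hne with
    | p0 :: pt, _ =>
      have hperm0 : (r0 :: rt).Perm (p0 :: pt) := hsp ▸ PySem.List.sorted_perm ..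
      have hpair : (r0 :: rt).Pairwise
          (fun a b => PySem.List.pyGetD a 1 0 ≤ PySem.List.pyGetD b 1 0) :=
        hsp ▸ PySem.List.sorted_pairwise ..
      have hpairT : ((r0 :: rt).map toTriple).Pairwise (fun a b => a.2.1 ≤ b.2.1) :=
        List.pairwise_map.mpr hpair
      have hpermT : ((r0 :: rt).map toTriple).Perm ((p0 :: pt).map toTriple) := hperm0.map _
      have hlen : (r0 :: rt).length = (p0 :: pt).length := hperm0.length_eq
      have hhead := PySem.List.key_head_sorted_le _ _ hsp
      have ht0 : PySem.List.pyGetD r0 1 0 =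
          pyMinI (toTriple p0).2.1 ((pt.map toTriple).map (fun j => j.2.1)) := by
        have hmem := pyMinI_mem (toTriple p0).2.1 ((pt.map toTriple).map (fun j => j.2.1))
        have hle := pyMinI_le (toTriple p0).2.1 ((pt.map toTriple).map (fun j => j.2.1))
          ((toTriple r0).2.1) (by
            have hr0 : r0 ∈ p0 :: pt := hperm0.mem_iff.mp (by simp)
            simp only [List.mem_cons, List.mem_map]
            rcases List.mem_cons.mp hr0 with h | h
            · exact Or.inl (by rw [h])
            · exact Or.inr ⟨toTriple r0, ⟨r0, h, rfl⟩, rfl⟩)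
        have hge : PySem.List.pyGetD r0 1 0 ≤
            pyMinI (toTriple p0).2.1 ((pt.map toTriple).map (fun j => j.2.1)) := by
          rcases List.mem_cons.mp hmem with h | h
          · rw [h]; exact hhead p0 (by simp)
          · rcases List.mem_map.mp h with ⟨y, hy, hyv⟩
            rcases List.mem_map.mp hy with ⟨r, hr, hrv⟩
            rw [← hyv, ← hrv]; exact hhead r (by simp [hr])
        have : (toTriple r0).2.1 = PySem.List.pyGetD r0 1 0 := rfl
        omega
      rw [hsp]
      simp only [List.map_cons]
      rw [List.map_cons] at hpairT hpermT
      have hres := loopA_eq_loopB (2 * (toTriple r0 :: rt.map toTriple).length + 1)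
        (toTriple r0 :: rt.map toTriple) [] (toTriple p0 :: pt.map toTriple) []
        (PySem.List.pyGetD r0 1 0) initWaits hpermT (List.Perm.refl _) hpairT
      have hlen2 : (toTriple r0 :: rt.map toTriple).length =
          (toTriple p0 :: pt.map toTriple).length := by simpa using hlen
      rw [hlen2] at hres
      rw [← ht0, hlen2, hres]
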